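-- pv_equiv track=rewrite | github.com/virajparmaj/snapback-memories | backend/server.py | get_month_summaries
-- ===== SOURCE A (Python) =====
-- from typing import Any, Optional
--
-- def get_month_summaries(memories: list[dict[str, Any]]) -> list[dict]:
--     counts: dict[tuple[int, int], int] = {}
--     for memory in memories:
--         if memory["year"] and memory["month"]:
--             key = (memory["year"], memory["month"])
--             counts[key] = counts.get(key, 0) + 1
--     summaries = [{"year": year, "month": month, "count": count} for (year, month), count in counts.items()]
--     summaries.sort(key=lambda summary: (summary["year"], summary["month"]), reverse=True)
--     return summaries
-- ===== SOURCE B (Python) =====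
-- def get_month_summaries(memories):
--     keys = [(m["year"], m["month"]) for m in memories if m["year"] and m["month"]]
--     keys.sort(reverse=True)
--     out = []
--     for k in keys:
--         if out and out[-1]["year"] == k[0] and out[-1]["month"] == k[1]:
--             out[-1]["count"] += 1
--         else:
--             out.append({"year": k[0], "month": k[1], "count": 1})
--     return out
-- ===== Notes on version B (the rewrite author's own statement) =====
-- stated objective: alternative
-- what changed: B replaces A's dict-accumulate-then-sort-distinct strategy with filter, sort all (year, month) keys descending, then a single consecutive-run grouping pass over the sorted keys.
import Mathlib
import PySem

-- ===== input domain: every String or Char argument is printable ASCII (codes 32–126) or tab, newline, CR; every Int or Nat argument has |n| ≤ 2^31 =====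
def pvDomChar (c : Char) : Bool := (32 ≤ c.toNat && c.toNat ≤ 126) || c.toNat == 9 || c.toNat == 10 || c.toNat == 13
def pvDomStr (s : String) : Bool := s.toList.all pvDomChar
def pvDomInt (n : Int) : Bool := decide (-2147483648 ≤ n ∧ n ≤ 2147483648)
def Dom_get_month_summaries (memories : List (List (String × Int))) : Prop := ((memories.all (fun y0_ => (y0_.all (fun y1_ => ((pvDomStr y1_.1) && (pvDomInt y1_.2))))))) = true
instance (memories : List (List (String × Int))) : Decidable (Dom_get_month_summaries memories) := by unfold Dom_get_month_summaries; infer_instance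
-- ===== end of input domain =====

-- B replaces A's dict-accumulate-then-sort-distinct strategy with filter → sort all keys descending → one
-- consecutive-run grouping pass; same return value, no argument is mutated by either version.

-- ===== PORT A =====
-- memory["year"] / memory["month"] raise KeyError when missing; the port totalises them with getD 0
-- (a missing key behaves like a falsy value) and Pre_ excludes exactly the raising inputs.
def get_month_summaries (memories : List (List (String × Int))) : List (List (String × Int)) :=
  let counts : PySem.Dict (Int × Int) Int :=
    memories.foldl (fun counts memory =>
      if (PySem.Dict.mk memory).getD "year" 0 ≠ 0 ∧ (PySem.Dict.mk memory).getD "month" 0 ≠ 0 then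
        counts.insert ((PySem.Dict.mk memory).getD "year" 0, (PySem.Dict.mk memory).getD "month" 0)
          (counts.getD ((PySem.Dict.mk memory).getD "year" 0, (PySem.Dict.mk memory).getD "month" 0) 0 + 1)
      else counts) PySem.Dict.empty
  let summaries := counts.items.map (fun p => [("year", p.1.1), ("month", p.1.2), ("count", p.2)])
  PySem.List.sorted2 summaries (fun s => (PySem.Dict.mk s).getD "year" 0)
    (fun s => (PySem.Dict.mk s).getD "month" 0) true

-- ===== PORT B =====
-- the body of B's 'for k in keys' loop ('out and out[-1]["year"] == k[0] and out[-1]["month"] == k[1]')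
def pvStep (out : List (List (String × Int))) (k : Int × Int) : List (List (String × Int)) :=
  if out ≠ [] ∧ (PySem.Dict.mk (PySem.List.pyGetD out (-1) [])).getD "year" 0 = k.1
      ∧ (PySem.Dict.mk (PySem.List.pyGetD out (-1) [])).getD "month" 0 = k.2 then
    out.dropLast ++ [((PySem.Dict.mk (PySem.List.pyGetD out (-1) [])).modify "count" 0 (· + 1)).items]
  else out ++ [[("year", k.1), ("month", k.2), ("count", (1 : Int))]]

def get_month_summaries_alt (memories : List (List (String × Int))) : List (List (String × Int)) :=
  let keys := memories.filterMap (fun m =>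
    if (PySem.Dict.mk m).getD "year" 0 ≠ 0 ∧ (PySem.Dict.mk m).getD "month" 0 ≠ 0 then
      some ((PySem.Dict.mk m).getD "year" 0, (PySem.Dict.mk m).getD "month" 0)
    else none)
  let skeys := PySem.List.sorted2 keys (fun k => k.1) (fun k => k.2) true
  skeys.foldl pvStep []

-- ===== PRECONDITION & SPEC =====
-- Pre_ excludes exactly the inputs where Python A raises KeyError: a memory without a "year" key,
-- or one whose truthy "year" comes with no "month" key (B raises on exactly the same inputs).
def Pre_get_month_summaries (memories : List (List (String × Int))) : Prop :=
  ∀ mem ∈ memories, (PySem.Dict.mk mem).contains "year" = true ∧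
    ((PySem.Dict.mk mem).getD "year" 0 ≠ 0 → (PySem.Dict.mk mem).contains "month" = true)
instance (memories : List (List (String × Int))) : Decidable (Pre_get_month_summaries memories) := by
  unfold Pre_get_month_summaries; infer_instance

def pvWitness_get_month_summaries : (List (List (String × Int))) :=
  [[("year", 2020), ("month", 5)], [("year", 0)], [("year", 2020), ("month", 5)], [("year", 2021), ("month", 1)]]

def Spec_get_month_summaries (memories : List (List (String × Int))) (out : List (List (String × Int))) : Prop := out = get_month_summaries_alt memories
instance (memories : List (List (String × Int))) (out : List (List (String × Int))) : Decidable (Spec_get_month_summaries memories out) := by unfold Spec_get_month_summaries; infer_instance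

-- ===== CLAIM (what is proved, stated in full; the proofs are below) =====
def Claim_equal_get_month_summaries : Prop := ∀ (memories : List (List (String × Int))), Dom_get_month_summaries memories → Pre_get_month_summaries memories → Spec_get_month_summaries memories (get_month_summaries memories)

-- ===== LEMMAS AND PROOFS =====

-- one output row {"year": k[0], "month": k[1], "count": c}
def pvRowl (k : Int × Int) (c : Int) : List (String × Int) :=
  [("year", k.1), ("month", k.2), ("count", c)]

-- the grouped output of B's loop over a key list, written as run-at-a-time recursion
def pvGroups : List (Int × Int) → List (List (String × Int))
  | [] => []
  | k :: rest =>
      pvRowl k (1 + ((rest.takeWhile (· = k)).length : Int)) :: pvGroups (rest.dropWhile (· = k))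
  termination_by l => l.length
  decreasing_by
    exact Nat.lt_succ_of_le (List.dropWhile_sublist _).length_le

-- first element of every run
def pvDedup : List (Int × Int) → List (Int × Int)
  | [] => []
  | k :: rest => k :: pvDedup (rest.dropWhile (· = k))
  termination_by l => l.length
  decreasing_by
    exact Nat.lt_succ_of_le (List.dropWhile_sublist _).length_le

theorem pvRowl_getD_year (k : Int × Int) (c : Int) :
    (PySem.Dict.mk (pvRowl k c)).getD "year" 0 = k.1 := rfl

theorem pvRowl_getD_month (k : Int × Int) (c : Int) :
    (PySem.Dict.mk (pvRowl k c)).getD "month" 0 = k.2 := rfl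

theorem pvRowl_bump (k : Int × Int) (c : Int) :
    ((PySem.Dict.mk (pvRowl k c)).modify "count" 0 (· + 1)).items = pvRowl k (c + 1) := rfl

theorem pvStep_last (out : List (List (String × Int))) (k x : Int × Int) (c : Int) :
    pvStep (out ++ [pvRowl k c]) x =
      if x = k then out ++ [pvRowl k (c + 1)]
      else (out ++ [pvRowl k c]) ++ [pvRowl x 1] := by
  unfold pvStep
  rw [PySem.List.pyGetD_neg_one_append_singleton]
  by_cases hx : x = k
  · subst hx
    simp [pvRowl_getD_year, pvRowl_getD_month, pvRowl_bump]
  · have : ¬((out ++ [pvRowl k c]) ≠ [] ∧ (PySem.Dict.mk (pvRowl k c)).getD "year" 0 = x.1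
        ∧ (PySem.Dict.mk (pvRowl k c)).getD "month" 0 = x.2) := by
      rw [pvRowl_getD_year, pvRowl_getD_month]
      rintro ⟨-, h1, h2⟩
      exact hx (Prod.ext h1.symm h2.symm)
    rw [if_neg this, if_neg hx]
    rfl

theorem pvFold_run (S : List (Int × Int)) :
    ∀ (k : Int × Int) (c : Int) (out : List (List (String × Int))),
    S.foldl pvStep (out ++ [pvRowl k c]) =
      out ++ pvRowl k (c + ((S.takeWhile (· = k)).length : Int)) :: pvGroups (S.dropWhile (· = k)) := by
  induction S with
  | nil => intro k c out; simp [pvGroups]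
  | cons x S ih =>
    intro k c out
    by_cases hx : x = k
    · subst hx
      rw [List.foldl_cons, pvStep_last, if_pos rfl, ih]
      simp
      ring_nf
    · rw [List.foldl_cons, pvStep_last, if_neg hx, ih]
      have ht : List.takeWhile (· = k) (x :: S) = [] := by
        simp [hx]
      have hd : List.dropWhile (· = k) (x :: S) = x :: S := by
        simp [hx]
      rw [ht, hd]
      simp [pvGroups]

theorem pvFold_eq_pvGroups (S : List (Int × Int)) :
    S.foldl pvStep [] = pvGroups S := by
  cases S with
  | nil => simp [pvGroups]
  | cons k S =>
    rw [List.foldl_cons]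
    have h0 : pvStep [] k = [] ++ [pvRowl k 1] := by simp [pvStep, pvRowl]
    rw [h0, pvFold_run]
    simp [pvGroups]

-- ---- order facts ----

theorem pv_toLex_inj {a b : Int × Int} (h : (toLex a : Lex (Int × Int)) = toLex b) : a = b := by
  exact congrArg (fun x => ofLex x) h

theorem pv_not_mem_dropWhile (k : Int × Int) :
    ∀ (rest : List (Int × Int)), (∀ y ∈ rest, (toLex y : Lex (Int × Int)) ≤ toLex k) →
      rest.Pairwise (fun a b => (toLex b : Lex (Int × Int)) ≤ toLex a) →
      k ∉ rest.dropWhile (· = k) := by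
  intro rest
  induction rest with
  | nil => intro _ _ h; simp at h
  | cons x r ih =>
    intro hle hpw
    by_cases hx : x = k
    · rw [List.dropWhile_cons_of_pos (by simp [hx])]
      exact ih (fun y hy => hle y (List.mem_cons_of_mem _ hy)) hpw.of_cons
    · rw [List.dropWhile_cons_of_neg (by simp [hx])]
      intro hmem
      rcases List.mem_cons.1 hmem with h | h
      · exact hx h.symm
      · have h1 : (toLex k : Lex (Int × Int)) ≤ toLex x := (List.pairwise_cons.1 hpw).1 k h
        have h2 : (toLex x : Lex (Int × Int)) ≤ toLex k := hle x List.mem_cons_self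
        exact hx (pv_toLex_inj (le_antisymm h2 h1))

theorem pvDedup_subset : ∀ (S : List (Int × Int)) (x : Int × Int), x ∈ pvDedup S → x ∈ S := by
  intro S
  induction S using pvDedup.induct with
  | case1 => intro x h; simp [pvDedup] at h
  | case2 k rest ih =>
    intro x h
    rw [pvDedup] at h
    rcases List.mem_cons.1 h with h | h
    · exact h ▸ List.mem_cons_self
    · exact List.mem_cons_of_mem _ ((List.dropWhile_sublist _).mem (ih x h))

theorem pvDedup_mem : ∀ (S : List (Int × Int)) (x : Int × Int), x ∈ S → x ∈ pvDedup S := by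
  intro S
  induction S using pvDedup.induct with
  | case1 => intro x h; simp at h
  | case2 k rest ih =>
    intro x h
    rw [pvDedup]
    rcases List.mem_cons.1 h with h | h
    · exact h ▸ List.mem_cons_self
    · conv at h => rw [← List.takeWhile_append_dropWhile (p := (· = k)) (l := rest)]
      rcases List.mem_append.1 h with h | h
      · have : x = k := by simpa using List.mem_takeWhile_imp h
        exact this ▸ List.mem_cons_self
      · exact List.mem_cons_of_mem _ (ih x h)

theorem pvDedup_pairwise_gt : ∀ (S : List (Int × Int)),
    S.Pairwise (fun a b => (toLex b : Lex (Int × Int)) ≤ toLex a) →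
    (pvDedup S).Pairwise (fun a b => (toLex b : Lex (Int × Int)) < toLex a) := by
  intro S
  induction S using pvDedup.induct with
  | case1 => intro _; simp [pvDedup]
  | case2 k rest ih =>
    intro hpw
    have hle : ∀ y ∈ rest, (toLex y : Lex (Int × Int)) ≤ toLex k := (List.pairwise_cons.1 hpw).1
    have hrest : rest.Pairwise (fun a b => (toLex b : Lex (Int × Int)) ≤ toLex a) := hpw.of_cons
    rw [pvDedup]
    refine List.pairwise_cons.2 ⟨?_, ih (hrest.sublist (List.dropWhile_sublist _))⟩
    intro y hy
    have hyd := hy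
    have hym : y ∈ rest := (List.dropWhile_sublist _).mem (pvDedup_subset (rest.dropWhile (· = k)) y hy)
    have hne : y ≠ k := by
      intro he
      exact pv_not_mem_dropWhile k rest hle hrest (he ▸ (pvDedup_subset (rest.dropWhile (· = k)) y hy))
    exact lt_of_le_of_ne (hle y hym) (fun he => hne (pv_toLex_inj he))

theorem pvGroups_eq_dedup_map : ∀ (n : Nat) (S : List (Int × Int)), S.length ≤ n →
    S.Pairwise (fun a b => (toLex b : Lex (Int × Int)) ≤ toLex a) →
    pvGroups S = (pvDedup S).map (fun k => pvRowl k (S.count k)) := by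
  intro n
  induction n with
  | zero =>
    intro S hlen _
    have : S = [] := List.eq_nil_of_length_eq_zero (Nat.le_zero.1 hlen)
    subst this; simp [pvGroups, pvDedup]
  | succ n ih =>
    intro S hlen hpw
    cases S with
    | nil => simp [pvGroups, pvDedup]
    | cons k rest =>
      have hle : ∀ y ∈ rest, (toLex y : Lex (Int × Int)) ≤ toLex k := (List.pairwise_cons.1 hpw).1
      have hrest : rest.Pairwise (fun a b => (toLex b : Lex (Int × Int)) ≤ toLex a) := hpw.of_cons
      have hdlen : (rest.dropWhile (· = k)).length ≤ n :=
        le_trans (List.dropWhile_sublist _).length_le (Nat.le_of_succ_le_succ hlen)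
      have hdpw := hrest.sublist (List.dropWhile_sublist (· = k))
      rw [pvGroups, pvDedup, List.map_cons, ih _ hdlen hdpw]
      have hcount : ((k :: rest).count k : Int) = 1 + ((rest.takeWhile (· = k)).length : Int) := by
        have hk : k ∉ rest.dropWhile (· = k) := pv_not_mem_dropWhile k rest hle hrest
        have ht : (rest.takeWhile (· = k)).count k = (rest.takeWhile (· = k)).length :=
          List.count_eq_length.2 (fun b hb => by
            have : b = k := by simpa using List.mem_takeWhile_imp hb
            simp [this])
        have : (k :: rest).count k = 1 + (rest.takeWhile (· = k)).length := by
          conv_lhs => rw [← List.takeWhile_append_dropWhile (p := (· = k)) (l := rest)]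
          rw [List.count_cons_self, List.count_append, ht, List.count_eq_zero.2 hk]
          omega
        rw [this]; push_cast; ring
      rw [hcount]
      congr 1
      apply List.map_congr_left
      intro x hx
      have hxd : x ∈ rest.dropWhile (· = k) := pvDedup_subset (rest.dropWhile (· = k)) x hx
      have hxk : x ≠ k := fun he => pv_not_mem_dropWhile k rest hle hrest (he ▸ hxd)
      have : (k :: rest).count x = (rest.dropWhile (· = k)).count x := by
        conv_lhs => rw [← List.takeWhile_append_dropWhile (p := (· = k)) (l := rest)]
        rw [List.count_cons_of_ne (by exact fun h => hxk h.symm), List.count_append,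
          List.count_eq_zero.2 (fun hmem => hxk (by simpa using List.mem_takeWhile_imp hmem)),
          Nat.zero_add]
      rw [this]

-- ---- sorted2 = sorted with a lexicographic key; sort commutes with map ----

theorem pv_sorted2_eq_sorted_lex {α : Type} (l : List α) (k1 k2 : α → Int) :
    PySem.List.sorted2 l k1 k2 true =
      PySem.List.sorted l (fun x => (toLex (k1 x, k2 x) : Lex (Int × Int))) true := by
  show l.foldl (fun acc x => PySem.List.insertBy
      (fun a b => decide (k1 b < k1 a) || (!decide (k1 a < k1 b) && decide (k2 b < k2 a))) x acc) []
    = l.foldl (fun acc x => PySem.List.insertBy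
      (fun a b => decide ((toLex (k1 b, k2 b) : Lex (Int × Int)) < toLex (k1 a, k2 a))) x acc) []
  have hB : (fun (a b : α) => decide (k1 b < k1 a) || (!decide (k1 a < k1 b) && decide (k2 b < k2 a)))
      = (fun a b => decide ((toLex (k1 b, k2 b) : Lex (Int × Int)) < toLex (k1 a, k2 a))) := by
    funext a b
    rw [Bool.eq_iff_iff]
    simp only [Bool.or_eq_true, Bool.and_eq_true, Bool.not_eq_true', decide_eq_true_eq,
      decide_eq_false_iff_not, Prod.Lex.lt_iff, ofLex_toLex]
    constructor
    · rintro (h | ⟨h1, h2⟩)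
      · exact Or.inl h
      · by_cases he : k1 b = k1 a
        · exact Or.inr ⟨he, h2⟩
        · exact Or.inl (lt_of_le_of_ne (not_lt.1 h1) he)
    · rintro (h | ⟨h1, h2⟩)
      · exact Or.inl h
      · exact Or.inr ⟨not_lt.2 (le_of_eq h1), h2⟩
  rw [hB]

theorem pv_insertBy_map {α β : Type} (f : α → β) (bf : β → β → Bool) (x : α) :
    ∀ (acc : List α), PySem.List.insertBy bf (f x) (acc.map f) =
      (PySem.List.insertBy (fun a b => bf (f a) (f b)) x acc).map f := by
  intro acc
  induction acc with
  | nil => rfl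
  | cons y ys ih =>
    rw [List.map_cons, PySem.List.insertBy, PySem.List.insertBy]
    by_cases h : bf (f x) (f y) = true
    · rw [if_pos h, if_pos h]; rfl
    · rw [if_neg h, if_neg h, List.map_cons, ih]

theorem pv_foldl_insertBy_map {α β : Type} (f : α → β) (bf : β → β → Bool) :
    ∀ (l : List α) (acc : List α),
      (l.map f).foldl (fun acc x => PySem.List.insertBy bf x acc) (acc.map f) =
        (l.foldl (fun acc x => PySem.List.insertBy (fun a b => bf (f a) (f b)) x acc) acc).map f := by
  intro l
  induction l with
  | nil => intro acc; rfl
  | cons x xs ih =>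
    intro acc
    rw [List.map_cons, List.foldl_cons, List.foldl_cons, pv_insertBy_map, ih]

theorem pv_sorted_rev_map {α β κ : Type} [LT κ] [DecidableLT κ] (f : α → β) (key : β → κ) (l : List α) :
    PySem.List.sorted (l.map f) key true = (PySem.List.sorted l (fun x => key (f x)) true).map f := by
  show (l.map f).foldl (fun acc x => PySem.List.insertBy (fun a b => decide (key b < key a)) x acc) ([].map f)
    = (l.foldl (fun acc x => PySem.List.insertBy (fun a b => decide (key (f b) < key (f a))) x acc) []).map f
  exact pv_foldl_insertBy_map f (fun a b => decide (key b < key a)) l []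

-- ---- the key list shared by both reductions ----

def pvKey (m : List (String × Int)) : Int × Int :=
  ((PySem.Dict.mk m).getD "year" 0, (PySem.Dict.mk m).getD "month" 0)

def pvKeys (memories : List (List (String × Int))) : List (Int × Int) :=
  (memories.filter (fun m =>
    decide ((PySem.Dict.mk m).getD "year" 0 ≠ 0 ∧ (PySem.Dict.mk m).getD "month" 0 ≠ 0))).map pvKey

theorem pvKeys_cons (m : List (String × Int)) (l : List (List (String × Int))) :
    pvKeys (m :: l) =
      if (PySem.Dict.mk m).getD "year" 0 ≠ 0 ∧ (PySem.Dict.mk m).getD "month" 0 ≠ 0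
      then pvKey m :: pvKeys l else pvKeys l := by
  unfold pvKeys
  rw [List.filter_cons]
  by_cases h : (PySem.Dict.mk m).getD "year" 0 ≠ 0 ∧ (PySem.Dict.mk m).getD "month" 0 ≠ 0
  · rw [if_pos h, decide_eq_true h]
    rfl
  · rw [if_neg h, decide_eq_false h]
    rfl

theorem pv_counts_eq (memories : List (List (String × Int))) :
    ∀ (d : PySem.Dict (Int × Int) Int),
    memories.foldl (fun counts memory =>
      if (PySem.Dict.mk memory).getD "year" 0 ≠ 0 ∧ (PySem.Dict.mk memory).getD "month" 0 ≠ 0 then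
        counts.insert ((PySem.Dict.mk memory).getD "year" 0, (PySem.Dict.mk memory).getD "month" 0)
          (counts.getD ((PySem.Dict.mk memory).getD "year" 0, (PySem.Dict.mk memory).getD "month" 0) 0 + 1)
      else counts) d
    = (pvKeys memories).foldl (fun d k => d.insert k (d.getD k 0 + 1)) d := by
  induction memories with
  | nil => intro d; rfl
  | cons m l ih =>
    intro d
    rw [List.foldl_cons, pvKeys_cons]
    by_cases h : (PySem.Dict.mk m).getD "year" 0 ≠ 0 ∧ (PySem.Dict.mk m).getD "month" 0 ≠ 0
    · rw [if_pos h, if_pos h, List.foldl_cons, ih]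
      rfl
    · rw [if_neg h, if_neg h, ih]

theorem pv_keysB_eq (memories : List (List (String × Int))) :
    memories.filterMap (fun m =>
      if (PySem.Dict.mk m).getD "year" 0 ≠ 0 ∧ (PySem.Dict.mk m).getD "month" 0 ≠ 0 then
        some ((PySem.Dict.mk m).getD "year" 0, (PySem.Dict.mk m).getD "month" 0)
      else none) = pvKeys memories := by
  induction memories with
  | nil => rfl
  | cons m l ih =>
    rw [pvKeys_cons]
    by_cases h : (PySem.Dict.mk m).getD "year" 0 ≠ 0 ∧ (PySem.Dict.mk m).getD "month" 0 ≠ 0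
    · rw [if_pos h, List.filterMap_cons_some (by rw [if_pos h]), ih]
      rfl
    · rw [if_neg h, List.filterMap_cons_none (by rw [if_neg h]), ih]

-- ---- the two sides, reduced to the same canonical form ----

theorem pv_A_eq (memories : List (List (String × Int))) :
    get_month_summaries memories =
      (PySem.List.sorted (PySem.Set.ofList (pvKeys memories)) (fun k => (toLex k : Lex (Int × Int))) true).map
        (fun k => pvRowl k ((pvKeys memories).count k)) := by
  show PySem.List.sorted2
      ((memories.foldl (fun counts memory =>
        if (PySem.Dict.mk memory).getD "year" 0 ≠ 0 ∧ (PySem.Dict.mk memory).getD "month" 0 ≠ 0 then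
          counts.insert ((PySem.Dict.mk memory).getD "year" 0, (PySem.Dict.mk memory).getD "month" 0)
            (counts.getD ((PySem.Dict.mk memory).getD "year" 0, (PySem.Dict.mk memory).getD "month" 0) 0 + 1)
        else counts) PySem.Dict.empty).items.map
        (fun p => [("year", p.1.1), ("month", p.1.2), ("count", p.2)]))
      (fun s => (PySem.Dict.mk s).getD "year" 0) (fun s => (PySem.Dict.mk s).getD "month" 0) true = _
  rw [pv_counts_eq, PySem.Dict.foldl_insert_getD_add_one_eq_counter, PySem.Dict.items_counter,
    List.map_map, pv_sorted2_eq_sorted_lex, pv_sorted_rev_map]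
  rfl

theorem pv_B_eq (memories : List (List (String × Int))) :
    get_month_summaries_alt memories =
      pvGroups (PySem.List.sorted (pvKeys memories) (fun k => (toLex k : Lex (Int × Int))) true) := by
  show (PySem.List.sorted2 (memories.filterMap (fun m =>
      if (PySem.Dict.mk m).getD "year" 0 ≠ 0 ∧ (PySem.Dict.mk m).getD "month" 0 ≠ 0 then
        some ((PySem.Dict.mk m).getD "year" 0, (PySem.Dict.mk m).getD "month" 0)
      else none)) (fun k => k.1) (fun k => k.2) true).foldl pvStep [] = _
  rw [pv_keysB_eq, pv_sorted2_eq_sorted_lex, pvFold_eq_pvGroups]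

-- ===== VERDICT (by name: the statement is the Claim_ definition above) =====
theorem get_month_summaries_spec : Claim_equal_get_month_summaries := by
  intro memories _ _
  unfold Spec_get_month_summaries
  rw [pv_A_eq, pv_B_eq]
  set keys := pvKeys memories with hkeys
  set S := PySem.List.sorted keys (fun k => (toLex k : Lex (Int × Int))) true with hS
  have hpw : S.Pairwise (fun a b => (toLex b : Lex (Int × Int)) ≤ toLex a) :=
    PySem.List.sorted_pairwise_rev keys _
  rw [pvGroups_eq_dedup_map S.length S le_rfl hpw]
  have hperm : S.Perm keys := PySem.List.sorted_perm keys _ true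
  have hsorted : PySem.List.sorted (PySem.Set.ofList keys) (fun k => (toLex k : Lex (Int × Int))) true
      = pvDedup S := by
    apply PySem.List.sorted_rev_eq_of_perm_of_pairwise_gt
    · have hnd : (pvDedup S).Nodup :=
        (pvDedup_pairwise_gt S hpw).imp (fun {a b} h he => absurd (he ▸ h) (lt_irrefl _))
      rw [List.perm_ext_iff_of_nodup hnd (PySem.Set.nodup_ofList keys)]
      intro a
      rw [PySem.Set.mem_ofList]
      constructor
      · intro h; exact hperm.mem_iff.1 (pvDedup_subset S a h)
      · intro h; exact pvDedup_mem S a (hperm.mem_iff.2 h)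
    · exact pvDedup_pairwise_gt S hpw
  rw [hsorted]
  apply List.map_congr_left
  intro x _
  rw [hperm.count_eq]
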